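-- pv_equiv track=rewrite | github.com/mackmc22/blackjack-backend | blackjack/api/views.py | sort_cards_save_to_cards
-- ===== SOURCE A (Python) =====
-- def sort_cards_save_to_cards(hand):
--     non_aces = []
--     all_aces = []
--
--     for card in hand:
--         if card == 'A':
--             all_aces.append(card)
--         else:
--             non_aces.append(card)
--
--     return non_aces + all_aces
-- ===== SOURCE B (Python) =====
-- def sort_cards_save_to_cards(hand):
--     # Stable sort on the ace test: non-aces (key False) first, aces (key True) last,
--     # each group keeping its original relative order.
--     return sorted(hand, key=lambda card: card == 'A')
-- ===== Notes on version B (the rewrite author's own statement) =====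
-- stated objective: idiomatic
-- what changed: Replaced the explicit two-list partition loop with a single stable sorted() call keyed on the ace test.
import Mathlib
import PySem

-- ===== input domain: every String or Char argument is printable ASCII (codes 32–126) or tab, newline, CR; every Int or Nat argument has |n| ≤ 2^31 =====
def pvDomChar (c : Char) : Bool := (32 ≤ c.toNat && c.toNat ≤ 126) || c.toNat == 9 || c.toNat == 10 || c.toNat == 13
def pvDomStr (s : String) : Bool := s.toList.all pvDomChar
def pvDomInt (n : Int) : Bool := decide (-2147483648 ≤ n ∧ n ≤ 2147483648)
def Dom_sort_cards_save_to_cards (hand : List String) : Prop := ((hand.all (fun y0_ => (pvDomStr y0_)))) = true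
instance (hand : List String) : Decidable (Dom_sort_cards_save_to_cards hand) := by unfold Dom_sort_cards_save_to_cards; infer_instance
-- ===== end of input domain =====

-- B replaces A's explicit two-list partition loop with one stable sort keyed on the ace test (idiomatic; same return value, no mutation in either).

-- ===== PORT A =====
-- the loop over hand appending each card to non_aces or all_aces, then non_aces + all_aces
def sort_cards_save_to_cards (hand : List String) : List String :=
  let p := hand.foldl
    (fun (st : List String × List String) card =>
      if card == "A" then (st.1, st.2 ++ [card]) else (st.1 ++ [card], st.2))
    ([], [])
  p.1 ++ p.2

-- ===== PORT B =====
-- sorted(hand, key=lambda card: card == 'A'); the Bool key is ported as Int 0/1 (False < True)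
def sort_cards_save_to_cards_alt (hand : List String) : List String :=
  PySem.List.sorted hand (fun card => if card == "A" then (1 : Int) else 0)

-- ===== PRECONDITION & SPEC =====
def Spec_sort_cards_save_to_cards (hand : List String) (out : List String) : Prop := out = sort_cards_save_to_cards_alt hand
instance (hand : List String) (out : List String) : Decidable (Spec_sort_cards_save_to_cards hand out) := by unfold Spec_sort_cards_save_to_cards; infer_instance

-- ===== CLAIM (what is proved, stated in full; the proofs are below) =====
def Claim_equal_sort_cards_save_to_cards : Prop := ∀ (hand : List String), Dom_sort_cards_save_to_cards hand → Spec_sort_cards_save_to_cards hand (sort_cards_save_to_cards hand)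

-- ===== LEMMAS AND PROOFS =====

-- the ace key used by B's port
def aceKey (c : String) : Int := if c == "A" then 1 else 0

lemma aceKey_le_one (c : String) : aceKey c ≤ 1 := by
  unfold aceKey; split <;> omega

lemma aceKey_nonace {c : String} (h : (c == "A") = false) : aceKey c = 0 := by
  simp [aceKey, h]

-- inserting an ace goes to the very end
lemma insertBy_ace (x : String) (hx : (x == "A") = true) (ys : List String) :
    PySem.List.insertBy (fun a b => decide (aceKey a < aceKey b)) x ys = ys ++ [x] := by
  apply PySem.List.insertBy_of_forall_not_before
  intro y _
  have h1 : aceKey x = 1 := by simp [aceKey, hx]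
  have := aceKey_le_one y
  simp [h1]; omega

-- inserting a non-ace goes right before the ace block
lemma insertBy_nonace (x : String) (hx : (x == "A") = false)
    (ns as : List String) (hns : ∀ n ∈ ns, (n == "A") = false) (has : ∀ a ∈ as, (a == "A") = true) :
    PySem.List.insertBy (fun a b => decide (aceKey a < aceKey b)) x (ns ++ as)
      = (ns ++ [x]) ++ as := by
  induction ns with
  | nil =>
    cases as with
    | nil => simp [PySem.List.insertBy]
    | cons a as' =>
      have hxe : ¬ x = "A" := by simpa using hx
      have hae : a = "A" := by simpa using has a (by simp)
      have : decide (aceKey x < aceKey a) = true := by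
        simp [aceKey, hxe, hae]
      simp [PySem.List.insertBy, this]
  | cons n ns' ih =>
    have hn : (n == "A") = false := hns n (by simp)
    have hlt : decide (aceKey x < aceKey n) = false := by
      simp [aceKey_nonace hx, aceKey_nonace hn]
    have ih' := ih (fun m hm => hns m (by simp [hm]))
    simp only [List.cons_append, PySem.List.insertBy, hlt, Bool.false_eq_true, if_false, ih']

-- B's insert-sort loop, with the partition invariant
lemma foldl_insertBy_partition (xs : List String) (ns as : List String)
    (hns : ∀ n ∈ ns, (n == "A") = false) (has : ∀ a ∈ as, (a == "A") = true) :
    xs.foldl (fun acc x => PySem.List.insertBy (fun a b => decide (aceKey a < aceKey b)) x acc) (ns ++ as)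
      = (ns ++ xs.filter (fun c => !(c == "A"))) ++ (as ++ xs.filter (fun c => c == "A")) := by
  induction xs generalizing ns as with
  | nil => simp
  | cons x xs ih =>
    by_cases hx : (x == "A") = true
    · have h1 : PySem.List.insertBy (fun a b => decide (aceKey a < aceKey b)) x (ns ++ as)
          = ns ++ (as ++ [x]) := by
        rw [insertBy_ace x hx]; simp
      have ih' := ih ns (as ++ [x]) hns (by
        intro a ha; rcases List.mem_append.mp ha with h | h
        · exact has a h
        · simp at h; simp [h, hx])
      simp only [List.foldl_cons, h1, ih', List.filter_cons, hx]
      simp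
    · have hx' : (x == "A") = false := by simpa using hx
      have h1 := insertBy_nonace x hx' ns as hns has
      have ih' := ih (ns ++ [x]) as (by
        intro n hn; rcases List.mem_append.mp hn with h | h
        · exact hns n h
        · simp at h; simp [h, hx']) has
      simp only [List.foldl_cons, h1, List.append_assoc] at *
      rw [ih']
      simp [List.filter_cons, hx']

-- A's partition loop, with the same invariant
lemma foldl_partition (xs : List String) (ns as : List String) :
    xs.foldl
      (fun (st : List String × List String) card =>
        if card == "A" then (st.1, st.2 ++ [card]) else (st.1 ++ [card], st.2))
      (ns, as)
      = (ns ++ xs.filter (fun c => !(c == "A")), as ++ xs.filter (fun c => c == "A")) := by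
  induction xs generalizing ns as with
  | nil => simp
  | cons x xs ih =>
    simp only [beq_iff_eq] at ih
    by_cases hxe : x = "A"
    · simp [List.foldl_cons, hxe, ih, List.filter_cons]
    · simp [List.foldl_cons, hxe, ih, List.filter_cons]

-- ===== VERDICT (by name: the statement is the Claim_ definition above) =====
theorem sort_cards_save_to_cards_spec : Claim_equal_sort_cards_save_to_cards := by
  intro hand _
  unfold Spec_sort_cards_save_to_cards sort_cards_save_to_cards sort_cards_save_to_cards_alt
  have hb : PySem.List.sorted hand (fun card => if card == "A" then (1 : Int) else 0)
      = hand.foldl (fun acc x => PySem.List.insertBy (fun a b => decide (aceKey a < aceKey b)) x acc) [] := by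
    rw [PySem.List.sorted_eq_foldl_insertBy]
    rfl
  have hB := foldl_insertBy_partition hand [] [] (by simp) (by simp)
  have hA := foldl_partition hand [] []
  simp only [List.nil_append] at hB hA
  rw [hA, hb, hB]
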